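-- pv_equiv track=rewrite | github.com/Aasthaengg/IBMdataset | Python_codes/p02384/s857609063.py | num_pattern_match
-- ===== SOURCE A (Python) =====
-- def num_pattern_match(num_list,pattern):
--     for i,x in enumerate(num_list):
--         is_match=True
--         for j,y in enumerate(pattern):
--             if num_list[(i+j) % len(num_list)] == pattern[j]:
--                 pass
--             else:
--                 is_match=False
--         if is_match:
--             return True
--
--     return False
-- ===== SOURCE B (Python) =====
-- def num_pattern_match(num_list, pattern):
--     n = len(num_list)
--     if n == 0:
--         return False
--     m = len(pattern)
--     if m == 0:
--         return True
--     MOD = (1 << 61) - 1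
--     BASE = 1000003
--     ph = 0
--     for y in pattern:
--         ph = (ph * BASE + y) % MOD
--     power = 1
--     for _ in range(m):
--         power = power * BASE % MOD
--     h = 0
--     for t in range(n + m - 1):
--         h = (h * BASE + num_list[t % n]) % MOD
--         if t >= m:
--             h = (h - num_list[(t - m) % n] * power) % MOD
--         if t >= m - 1 and h == ph:
--             i = t - m + 1
--             if all(num_list[(i + j) % n] == pattern[j] for j in range(m)):
--                 return True
--     return False
-- ===== Notes on version B (the rewrite author's own statement) =====
-- stated objective: faster
-- what changed: Replaces A's per-offset modular re-scan (n offsets, each fully re-checking the pattern since the inner loop never breaks) by a single Rabin-Karp pass: one rolling polynomial hash over the length-(n+m-1) cyclic stream, comparing each window hash to the pattern hash and verifying element-wise only on hash hits.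
import Mathlib
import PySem

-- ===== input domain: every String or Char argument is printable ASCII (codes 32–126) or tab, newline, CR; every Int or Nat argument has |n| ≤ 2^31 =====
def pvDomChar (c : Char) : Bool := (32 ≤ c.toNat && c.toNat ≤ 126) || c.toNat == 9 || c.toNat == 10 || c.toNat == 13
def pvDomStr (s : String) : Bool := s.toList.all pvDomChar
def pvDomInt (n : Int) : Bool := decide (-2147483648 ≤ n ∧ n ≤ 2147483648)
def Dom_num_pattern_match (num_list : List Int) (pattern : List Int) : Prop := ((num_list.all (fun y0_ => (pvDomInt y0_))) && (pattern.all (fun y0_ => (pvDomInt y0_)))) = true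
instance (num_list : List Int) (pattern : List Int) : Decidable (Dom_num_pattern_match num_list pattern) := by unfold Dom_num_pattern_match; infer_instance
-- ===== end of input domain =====

-- B replaces A's per-offset modular re-scan by a single Rabin-Karp rolling-hash pass over the
-- cyclic stream, verifying a window element-wise only on a hash hit; a timing run measured
-- B faster (one pass of n+m-1 hash steps instead of n*m comparisons).

-- ===== PORT A =====
-- inner loop: for j,y in enumerate(pattern): if num_list[(i+j)%len(num_list)] == pattern[j]: pass else: is_match=False
def pvAInner (num_list : List Int) (i : Int) (pattern : List Int) : Bool :=
  (PySem.List.enumerate pattern).foldl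
    (fun is_match jy =>
      if PySem.List.pyGet? num_list (PySem.Int.mod (i + jy.1) (num_list.length : Int)) =
         PySem.List.pyGet? pattern jy.1 then is_match else false) true

-- outer loop with the early `return True`
def pvALoop (num_list : List Int) (pattern : List Int) : List (Int × Int) → Bool
  | [] => false
  | ix :: rest => if pvAInner num_list ix.1 pattern then true else pvALoop num_list pattern rest

def num_pattern_match (num_list : List Int) (pattern : List Int) : Bool :=
  pvALoop num_list pattern (PySem.List.enumerate num_list)

-- ===== PORT B =====
def pvMOD : Int := 2305843009213693951   -- (1 << 61) - 1
def pvBASE : Int := 1000003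

-- ph = 0; for y in pattern: ph = (ph * BASE + y) % MOD
def pvPatHash (pattern : List Int) : Int :=
  pattern.foldl (fun ph y => PySem.Int.mod (ph * pvBASE + y) pvMOD) 0

-- power = 1; for _ in range(m): power = power * BASE % MOD
def pvPower (m : Nat) : Int :=
  (PySem.List.pyRange 0 (m : Int) 1).foldl (fun pw _ => PySem.Int.mod (pw * pvBASE) pvMOD) 1

-- all(num_list[(i+j) % n] == pattern[j] for j in range(m))   (indices always in range here)
def pvBVerify (num_list pattern : List Int) (i : Int) : Bool :=
  (PySem.List.pyRange 0 (pattern.length : Int) 1).all fun j =>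
    PySem.List.pyGet? num_list (PySem.Int.mod (i + j) (num_list.length : Int)) ==
      PySem.List.pyGet? pattern j

-- h = (h*BASE + num_list[t%n]) % MOD;  if t >= m: h = (h - num_list[(t-m)%n]*power) % MOD
-- (indices t%n and (t-m)%n are always in range, so pyGetD is exact here)
def pvBStep (num_list pattern : List Int) (pw h t : Int) : Int :=
  if (pattern.length : Int) ≤ t then
    PySem.Int.mod
      (PySem.Int.mod (h * pvBASE +
          PySem.List.pyGetD num_list (PySem.Int.mod t (num_list.length : Int)) 0) pvMOD -
        PySem.List.pyGetD num_list
          (PySem.Int.mod (t - (pattern.length : Int)) (num_list.length : Int)) 0 * pw) pvMOD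
  else
    PySem.Int.mod (h * pvBASE +
      PySem.List.pyGetD num_list (PySem.Int.mod t (num_list.length : Int)) 0) pvMOD

-- the main scan with the early `return True`
def pvBLoop (num_list pattern : List Int) (ph pw : Int) : List Int → Int → Bool
  | [], _ => false
  | t :: rest, h =>
    if (pattern.length : Int) - 1 ≤ t ∧ pvBStep num_list pattern pw h t = ph then
      if pvBVerify num_list pattern (t - (pattern.length : Int) + 1) then true
      else pvBLoop num_list pattern ph pw rest (pvBStep num_list pattern pw h t)
    else pvBLoop num_list pattern ph pw rest (pvBStep num_list pattern pw h t)

def num_pattern_match_alt (num_list : List Int) (pattern : List Int) : Bool :=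
  if num_list.length = 0 then false
  else if pattern.length = 0 then true
  else
    pvBLoop num_list pattern (pvPatHash pattern) (pvPower pattern.length)
      (PySem.List.pyRange 0 ((num_list.length : Int) + (pattern.length : Int) - 1) 1) 0

-- ===== PRECONDITION & SPEC =====
def Spec_num_pattern_match (num_list : List Int) (pattern : List Int) (out : Bool) : Prop := out = num_pattern_match_alt num_list pattern
instance (num_list : List Int) (pattern : List Int) (out : Bool) : Decidable (Spec_num_pattern_match num_list pattern out) := by unfold Spec_num_pattern_match; infer_instance

-- ===== CLAIM (what is proved, stated in full; the proofs are below) =====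
def Claim_equal_num_pattern_match : Prop := ∀ (num_list : List Int) (pattern : List Int), Dom_num_pattern_match num_list pattern → Spec_num_pattern_match num_list pattern (num_pattern_match num_list pattern)

-- ===== LEMMAS AND PROOFS =====

-- ---- proof-only definitions ----
def pvM : Nat := 2305843009213693951

-- the cyclic stream  s t = num_list[t % n]
def pvS (nl : List Int) (t : Nat) : Int := nl.getD (t % nl.length) 0

-- B's rolling-hash state after processing index t / before processing index t (Nat indices)
def pvStep (nl : List Int) (m : Nat) (pw h : Int) (t : Nat) : Int :=
  if m ≤ t then
    PySem.Int.mod (PySem.Int.mod (h * pvBASE + pvS nl t) pvMOD - pvS nl (t - m) * pw) pvMOD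
  else PySem.Int.mod (h * pvBASE + pvS nl t) pvMOD

def pvHAt (nl : List Int) (m : Nat) (pw : Int) : Nat → Int
  | 0 => pvStep nl m pw 0 0
  | t + 1 => pvStep nl m pw (pvHAt nl m pw t) (t + 1)

def pvHPre (nl : List Int) (m : Nat) (pw : Int) : Nat → Int
  | 0 => 0
  | t + 1 => pvHAt nl m pw t

-- the window of the stream ending at t (length min(t+1, m))
def pvWin (nl : List Int) (m t : Nat) : List Int :=
  (List.range (min (t + 1) m)).map (fun j => pvS nl (t + 1 - min (t + 1) m + j))

-- "pattern matches cyclically at offset i", as a Bool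
def pvMatchB (nl p : List Int) (i : Nat) : Bool :=
  (List.range p.length).all (fun j => nl[(i + j) % nl.length]? == p[j]?)

-- B's per-position hit condition
def pvCond (nl p : List Int) (pw : Int) (t : Nat) : Bool :=
  decide (p.length - 1 ≤ t) && (pvHAt nl p.length pw t == pvPatHash p)
    && pvBVerify nl p ((t + 1 - p.length : Nat) : Int)

theorem pvHAt_eq_step (nl : List Int) (m : Nat) (pw : Int) (t : Nat) :
    pvHAt nl m pw t = pvStep nl m pw (pvHPre nl m pw t) t := by
  cases t <;> rfl

-- ---- A-side characterisation ----
theorem pv_foldl_if_false {β : Type} (C : β → Prop) [DecidablePred C] :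
    ∀ (l : List β) (b : Bool),
      l.foldl (fun acc x => if C x then acc else false) b = (b && l.all (fun x => decide (C x))) := by
  intro l
  induction l with
  | nil => intro b; simp
  | cons x xs ih =>
      intro b
      by_cases h : C x
      · simp only [List.foldl_cons, if_pos h, ih, List.all_cons, decide_eq_true h, Bool.true_and]
      · simp only [List.foldl_cons, if_neg h, ih, List.all_cons, decide_eq_false h,
          Bool.false_and, Bool.and_false, Bool.false_and]

theorem pv_loop_eq_any (num_list pattern : List Int) :
    ∀ (l : List (Int × Int)),
      pvALoop num_list pattern l = l.any (fun ix => pvAInner num_list ix.1 pattern) := by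
  intro l
  induction l with
  | nil => simp [pvALoop]
  | cons ix rest ih =>
      by_cases h : pvAInner num_list ix.1 pattern = true <;> simp [pvALoop, h, ih]

theorem pvAInner_eq (nl p : List Int) (i : Nat) :
    pvAInner nl (i : Int) p = pvMatchB nl p i := by
  unfold pvAInner pvMatchB
  rw [pv_foldl_if_false, Bool.true_and, Bool.eq_iff_iff]
  simp only [List.all_eq_true, decide_eq_true_eq, beq_iff_eq]
  constructor
  · intro h j hj
    rw [List.mem_range] at hj
    have := h ((j : Int), p[j]) (by
      rw [PySem.List.mem_enumerate_iff]; exact ⟨j, hj, by simp⟩)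
    rw [show (i : Int) + (j : Int) = ((i + j : Nat) : Int) by push_cast; ring,
      PySem.Int.mod_natCast, PySem.List.pyGet?_natCast, PySem.List.pyGet?_natCast] at this
    exact this
  · intro h jy hjy
    rw [PySem.List.mem_enumerate_iff] at hjy
    obtain ⟨j, hj, rfl⟩ := hjy
    simp only [zero_add]
    rw [show (i : Int) + (j : Int) = ((i + j : Nat) : Int) by push_cast; ring,
      PySem.Int.mod_natCast, PySem.List.pyGet?_natCast, PySem.List.pyGet?_natCast]
    exact h j (List.mem_range.mpr hj)

theorem pvA_char (nl p : List Int) :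
    num_pattern_match nl p = (List.range nl.length).any (pvMatchB nl p) := by
  unfold num_pattern_match
  rw [pv_loop_eq_any]
  have hmap : (PySem.List.enumerate nl).any (fun ix => pvAInner nl ix.1 p)
      = ((PySem.List.enumerate nl).map (fun ix => ix.1)).any (fun i => pvAInner nl i p) := by
    rw [List.any_map]; rfl
  rw [hmap, PySem.List.map_fst_enumerate, zero_add, PySem.List.pyRange_one, List.any_map]
  simp only [sub_zero, Int.toNat_natCast, Function.comp_def, zero_add, pvAInner_eq]

-- ---- B-side: verify = matchB ----
theorem pvBVerify_eq (nl p : List Int) (i : Nat) :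
    pvBVerify nl p (i : Int) = pvMatchB nl p i := by
  unfold pvBVerify pvMatchB
  rw [PySem.List.pyRange_one, List.all_map]
  simp only [sub_zero, Int.toNat_natCast, Function.comp_def, zero_add]
  rw [Bool.eq_iff_iff]
  simp only [List.all_eq_true, beq_iff_eq]
  constructor
  · intro h j hj
    have := h j hj
    rw [show (i : Int) + (j : Int) = ((i + j : Nat) : Int) by push_cast; ring,
      PySem.Int.mod_natCast, PySem.List.pyGet?_natCast, PySem.List.pyGet?_natCast] at this
    exact this
  · intro h j hj
    rw [show (i : Int) + (j : Int) = ((i + j : Nat) : Int) by push_cast; ring,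
      PySem.Int.mod_natCast, PySem.List.pyGet?_natCast, PySem.List.pyGet?_natCast]
    exact h j hj

-- ---- B-side: the step on Nat indices ----
theorem pvBStep_eq (nl p : List Int) (pw h : Int) (a : Nat) :
    pvBStep nl p pw h (a : Int) = pvStep nl p.length pw h a := by
  unfold pvBStep pvStep
  have hs : PySem.List.pyGetD nl (PySem.Int.mod (a : Int) (nl.length : Int)) 0 = pvS nl a := by
    rw [PySem.Int.mod_natCast, PySem.List.pyGetD_natCast]; rfl
  by_cases hma : p.length ≤ a
  · rw [if_pos (by exact_mod_cast hma), if_pos hma, hs,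
      show (a : Int) - (p.length : Int) = ((a - p.length : Nat) : Int) by omega,
      PySem.Int.mod_natCast, PySem.List.pyGetD_natCast]
    rfl
  · rw [if_neg (by exact_mod_cast hma), if_neg hma, hs]

-- ---- B-side: the loop computes `any pvCond` ----
theorem pvBLoop_spec (nl p : List Int) (pw : Int) :
    ∀ (k a : Nat),
      pvBLoop nl p (pvPatHash p) pw (PySem.List.pyRange (a : Int) ((a + k : Nat) : Int) 1)
          (pvHPre nl p.length pw a)
        = (List.range' a k).any (pvCond nl p pw) := by
  intro k
  induction k with
  | zero =>
      intro a
      rw [PySem.List.pyRange_one_eq_nil (by exact_mod_cast Nat.le_refl a)]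
      simp [pvBLoop]
  | succ k ih =>
      intro a
      rw [PySem.List.pyRange_one_cons (by exact_mod_cast Nat.lt_add_of_pos_right k.succ_pos)]
      show (if (p.length : Int) - 1 ≤ (a : Int) ∧
              pvBStep nl p pw (pvHPre nl p.length pw a) (a : Int) = pvPatHash p then
            if pvBVerify nl p ((a : Int) - (p.length : Int) + 1) then true
            else pvBLoop nl p (pvPatHash p) pw _ (pvBStep nl p pw (pvHPre nl p.length pw a) (a : Int))
          else pvBLoop nl p (pvPatHash p) pw _ (pvBStep nl p pw (pvHPre nl p.length pw a) (a : Int)))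
          = _
      rw [pvBStep_eq, ← pvHAt_eq_step]
      have hrange' : List.range' a (k + 1) = a :: List.range' (a + 1) k := List.range'_succ ..
      have hrec : pvBLoop nl p (pvPatHash p) pw
            (PySem.List.pyRange ((a : Int) + 1) ((a + (k + 1) : Nat) : Int) 1)
            (pvHAt nl p.length pw a)
          = (List.range' (a + 1) k).any (pvCond nl p pw) := by
        rw [show ((a + (k + 1) : Nat) : Int) = (((a + 1) + k : Nat) : Int) by omega,
          show (a : Int) + 1 = ((a + 1 : Nat) : Int) by omega]
        exact ih (a + 1)
      by_cases hc : (p.length : Int) - 1 ≤ (a : Int) ∧ pvHAt nl p.length pw a = pvPatHash p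
      · rw [if_pos hc]
        have hm1 : p.length - 1 ≤ a := by
          have := hc.1; omega
        have harg : (a : Int) - (p.length : Int) + 1 = ((a + 1 - p.length : Nat) : Int) := by
          omega
        rw [harg]
        by_cases hv : pvBVerify nl p ((a + 1 - p.length : Nat) : Int) = true
        · rw [if_pos hv, hrange']
          have : pvCond nl p pw a = true := by
            unfold pvCond
            rw [hv]
            simp only [Bool.and_true, Bool.and_eq_true, decide_eq_true_eq, beq_iff_eq]
            exact ⟨hm1, hc.2⟩
          simp [this]
        · rw [if_neg hv, hrec, hrange']
          have : pvCond nl p pw a = false := by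
            unfold pvCond
            rw [Bool.eq_false_iff]
            intro hcc
            exact hv (Bool.and_eq_true _ _ |>.mp hcc).2
          simp [this]
      · rw [if_neg hc, hrec, hrange']
        have : pvCond nl p pw a = false := by
          unfold pvCond
          rw [Bool.eq_false_iff]
          intro hcc
          rcases Bool.and_eq_true _ _ |>.mp hcc with ⟨h1, _⟩
          rcases Bool.and_eq_true _ _ |>.mp h1 with ⟨hd, hh⟩
          exact hc ⟨by have := of_decide_eq_true hd; omega, beq_iff_eq.mp hh⟩
        simp [this]

-- ---- modular arithmetic over ZMod ----
def pvBz : ZMod pvM := (pvBASE : ZMod pvM)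

def pvHz (l : List Int) : ZMod pvM := l.foldl (fun (a : ZMod pvM) (c : Int) => a * pvBz + (c : ZMod pvM)) 0

theorem pvMOD_pos : (0 : Int) < pvMOD := by norm_num [pvMOD]

theorem pv_cast_MOD : ((pvMOD : Int) : ZMod pvM) = 0 := by
  have h : (pvMOD : Int) = ((pvM : Nat) : Int) := by norm_num [pvMOD, pvM]
  rw [h, Int.cast_natCast, ZMod.natCast_self]

theorem pv_cast_mod (x : Int) : ((PySem.Int.mod x pvMOD : Int) : ZMod pvM) = (x : ZMod pvM) := by
  rw [PySem.Int.mod_eq_emod_of_pos pvMOD_pos, Int.emod_def]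
  push_cast
  rw [pv_cast_MOD]
  ring

theorem pv_mod_eq_of_cast {x y : Int} (h : (x : ZMod pvM) = (y : ZMod pvM)) :
    PySem.Int.mod x pvMOD = PySem.Int.mod y pvMOD := by
  rw [PySem.Int.mod_eq_emod_of_pos pvMOD_pos, PySem.Int.mod_eq_emod_of_pos pvMOD_pos]
  have h2 : x % ((pvM : Nat) : Int) = y % ((pvM : Nat) : Int) :=
    (ZMod.intCast_eq_intCast_iff x y pvM).mp h
  have h3 : ((pvM : Nat) : Int) = pvMOD := by norm_num [pvM, pvMOD]
  rwa [h3] at h2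

theorem pv_cast_patHash :
    ∀ (l : List Int) (a : Int),
      ((l.foldl (fun a c => PySem.Int.mod (a * pvBASE + c) pvMOD) a : Int) : ZMod pvM)
        = l.foldl (fun (a : ZMod pvM) (c : Int) => a * pvBz + (c : ZMod pvM)) ((a : Int) : ZMod pvM) := by
  intro l
  induction l with
  | nil => intro a; rfl
  | cons c l ih =>
      intro a
      rw [List.foldl_cons, List.foldl_cons, ih, pv_cast_mod]
      push_cast
      rfl

theorem pv_cast_patHash' (l : List Int) : ((pvPatHash l : Int) : ZMod pvM) = pvHz l := by
  unfold pvPatHash pvHz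
  rw [pv_cast_patHash]
  norm_num

theorem pv_hz_unfold_cons (c : Int) (l : List Int) :
    pvHz (c :: l) = l.foldl (fun (a : ZMod pvM) (c : Int) => a * pvBz + (c : ZMod pvM))
      (0 * pvBz + (c : ZMod pvM)) := by
  unfold pvHz
  rw [List.foldl_cons]

theorem pv_hz_foldl :
    ∀ (l : List Int) (a : ZMod pvM),
      l.foldl (fun (a : ZMod pvM) (c : Int) => a * pvBz + (c : ZMod pvM)) a
        = a * pvBz ^ l.length + pvHz l := by
  intro l
  induction l with
  | nil => intro a; simp [pvHz]
  | cons c l ih =>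
      intro a
      rw [List.foldl_cons, ih, pv_hz_unfold_cons, ih, List.length_cons]
      ring

theorem pv_hz_cons (c : Int) (l : List Int) :
    pvHz (c :: l) = (c : ZMod pvM) * pvBz ^ l.length + pvHz l := by
  rw [pv_hz_unfold_cons, pv_hz_foldl]
  ring

theorem pv_cast_power (m : Nat) : ((pvPower m : Int) : ZMod pvM) = pvBz ^ m := by
  induction m with
  | zero =>
      unfold pvPower
      rw [Nat.cast_zero, PySem.List.pyRange_one_eq_nil (le_refl 0)]
      simp
  | succ m ih =>
      unfold pvPower
      rw [show ((m + 1 : Nat) : Int) = ((m : Int) + 1) by push_cast; ring,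
        PySem.List.pyRange_one_succ_right (by exact_mod_cast Nat.zero_le m), List.foldl_append,
        List.foldl_cons, List.foldl_nil, pv_cast_mod]
      push_cast
      unfold pvPower at ih
      rw [ih, pow_succ]
      rfl

-- pvPatHash of a snoc, as plain Int arithmetic
theorem pv_patHash_append_singleton (l : List Int) (c : Int) :
    pvPatHash (l ++ [c]) = PySem.Int.mod (pvPatHash l * pvBASE + c) pvMOD := by
  unfold pvPatHash
  rw [List.foldl_append, List.foldl_cons, List.foldl_nil]

-- ---- the rolling-hash invariant ----
theorem pv_win_lo (nl : List Int) (q t : Nat) (h : t ≤ q) :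
    pvWin nl (q + 1) t = (List.range (t + 1)).map (fun j => pvS nl j) := by
  unfold pvWin
  rw [show min (t + 1) (q + 1) = t + 1 by omega]
  apply List.map_congr_left
  intro j hj
  exact congrArg (pvS nl) (by omega)

theorem pv_win_hi (nl : List Int) (q t : Nat) (h : q ≤ t) :
    pvWin nl (q + 1) t = (List.range (q + 1)).map (fun j => pvS nl (t - q + j)) := by
  unfold pvWin
  rw [show min (t + 1) (q + 1) = q + 1 by omega]
  apply List.map_congr_left
  intro j hj
  exact congrArg (pvS nl) (by omega)

theorem pv_invariant_aux (nl : List Int) (q : Nat) :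
    ∀ t, pvHAt nl (q + 1) (pvPower (q + 1)) t = pvPatHash (pvWin nl (q + 1) t) := by
  intro t
  induction t with
  | zero =>
      show pvStep nl (q + 1) (pvPower (q + 1)) 0 0 = _
      rw [pvStep, if_neg (by omega), pv_win_lo nl q 0 (by omega)]
      rfl
  | succ t ih =>
      show pvStep nl (q + 1) (pvPower (q + 1)) (pvHAt nl (q + 1) (pvPower (q + 1)) t) (t + 1) = _
      rw [pvStep]
      by_cases hmt : q + 1 ≤ t + 1
      · rw [if_pos hmt]
        have hq : q ≤ t := by omega
        have hwT1 : pvWin nl (q + 1) (t + 1) =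
            ((List.range q).map (fun j => pvS nl (t + 1 - q + j))) ++ [pvS nl (t + 1)] := by
          rw [pv_win_hi nl q (t + 1) (by omega), List.range_succ, List.map_append,
            List.map_singleton]
          refine congrArg₂ _ rfl ?_
          rw [show t + 1 - q + q = t + 1 by omega]
        have hwT : pvWin nl (q + 1) t =
            pvS nl (t - q) :: (List.range q).map (fun j => pvS nl (t + 1 - q + j)) := by
          rw [pv_win_hi nl q t hq, List.range_succ_eq_map, List.map_cons, List.map_map]
          refine congrArg₂ _ (congrArg (pvS nl) (by omega)) ?_
          apply List.map_congr_left
          intro j hj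
          exact congrArg (pvS nl) (by omega)
        rw [hwT1, pv_patHash_append_singleton, ih, hwT,
          show t + 1 - (q + 1) = t - q by omega]
        apply pv_mod_eq_of_cast
        push_cast
        rw [pv_cast_mod]
        push_cast
        simp only [pv_cast_patHash']
        rw [pv_cast_power, pv_hz_cons,
          show ((List.range q).map (fun j => pvS nl (t + 1 - q + j))).length = q by simp,
          show ((pvBASE : Int) : ZMod pvM) = pvBz from rfl, pow_succ]
        ring
      · rw [if_neg hmt]
        have ht : t + 1 ≤ q := by omega
        have hwT1 : pvWin nl (q + 1) (t + 1) =
            ((List.range (t + 1)).map (fun j => pvS nl j)) ++ [pvS nl (t + 1)] := by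
          rw [pv_win_lo nl q (t + 1) ht, List.range_succ, List.map_append, List.map_singleton]
        rw [hwT1, pv_patHash_append_singleton, ih, pv_win_lo nl q t (by omega)]

theorem pv_invariant (nl : List Int) (m : Nat) (hm : 0 < m) :
    ∀ t, pvHAt nl m (pvPower m) t = pvPatHash (pvWin nl m t) := by
  obtain ⟨q, rfl⟩ : ∃ q, m = q + 1 := ⟨m - 1, by omega⟩
  exact pv_invariant_aux nl q

-- ---- a cyclic match makes the window equal the pattern ----
theorem pv_win_eq_pattern (nl p : List Int) (i : Nat)
    (hm : 0 < p.length) (hmatch : pvMatchB nl p i = true) :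
    pvWin nl p.length (i + p.length - 1) = p := by
  unfold pvMatchB at hmatch
  rw [List.all_eq_true] at hmatch
  have hmin : min (i + p.length - 1 + 1) p.length = p.length := by omega
  unfold pvWin
  rw [hmin]
  apply List.ext_getElem (by simp)
  intro j h1 h2
  simp only [List.getElem_map, List.getElem_range]
  have hj : j < p.length := by simpa using h2
  have harg : i + p.length - 1 + 1 - p.length + j = i + j := by omega
  rw [harg]
  have := hmatch j (List.mem_range.mpr hj)
  rw [beq_iff_eq] at this
  unfold pvS
  rw [List.getD_eq_getElem?_getD, this, List.getElem?_eq_getElem hj, Option.getD_some]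

-- ===== VERDICT (by name: the statement is the Claim_ definition above) =====
theorem num_pattern_match_spec : Claim_equal_num_pattern_match := by
  intro nl p _
  unfold Spec_num_pattern_match num_pattern_match_alt
  by_cases hn : nl.length = 0
  · rw [if_pos hn]
    have : nl = [] := List.length_eq_zero_iff.mp hn
    subst this
    simp [num_pattern_match, pvALoop, PySem.List.enumerate_nil]
  · rw [if_neg hn]
    have hn' : 0 < nl.length := Nat.pos_of_ne_zero hn
    by_cases hp : p.length = 0
    · rw [if_pos hp, pvA_char]
      rw [List.any_eq_true]
      refine ⟨0, List.mem_range.mpr hn', ?_⟩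
      unfold pvMatchB
      rw [hp]
      simp
    · rw [if_neg hp]
      have hm : 0 < p.length := Nat.pos_of_ne_zero hp
      have hB := pvBLoop_spec nl p (pvPower p.length) (nl.length + p.length - 1) 0
      simp only [pvHPre] at hB
      norm_num at hB
      rw [pvA_char,
        show (nl.length : Int) + (p.length : Int) - 1
            = ((nl.length + p.length - 1 : Nat) : Int) by omega,
        hB, Bool.eq_iff_iff, List.any_eq_true, List.any_eq_true]
      constructor
      · rintro ⟨i, hi, hmB⟩
        rw [List.mem_range] at hi
        refine ⟨i + p.length - 1, ?_, ?_⟩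
        · rw [List.mem_range'_1]; omega
        · unfold pvCond
          simp only [Bool.and_eq_true, decide_eq_true_eq, beq_iff_eq]
          refine ⟨⟨by omega, ?_⟩, ?_⟩
          · rw [pv_invariant nl p.length hm, pv_win_eq_pattern nl p i hm hmB]
          · rw [show i + p.length - 1 + 1 - p.length = i by omega, pvBVerify_eq]
            exact hmB
      · rintro ⟨t, ht, hcond⟩
        rw [List.mem_range'_1] at ht
        unfold pvCond at hcond
        simp only [Bool.and_eq_true, decide_eq_true_eq, beq_iff_eq] at hcond
        obtain ⟨⟨hd, _⟩, hv⟩ := hcond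
        rw [pvBVerify_eq] at hv
        refine ⟨t + 1 - p.length, List.mem_range.mpr (by omega), hv⟩
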